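-- pv_equiv track=rewrite | github.com/SeppoPakonen/AudioAssets | src/rhyme_calculator/engine.py | _find_last_stressed_vowel_index
-- ===== SOURCE A (Python) =====
-- from typing import List, Tuple, Dict
--
-- def _find_last_stressed_vowel_index(phonemes: List[str]) -> int:
--     """
--     Find the index of the last stressed vowel in a sequence of phonemes.
--
--     Args:
--         phonemes: List of phonemes
--
--     Returns:
--         Index of the last stressed vowel, or -1 if none found
--     """
--     vowels = ['AA', 'AE', 'AH', 'AO', 'AW', 'AY', 'EH', 'ER', 'EY', 'IH', 'IY', 'OW', 'OY', 'UH', 'UW']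
--     # Stressed vowels typically end with '1' or '2'
--     stressed_vowels = [v + '1' for v in vowels] + [v + '2' for v in vowels]
--
--     # Look for stressed vowels from the end
--     for i in range(len(phonemes) - 1, -1, -1):
--         if phonemes[i] in stressed_vowels:
--             return i
--
--     # If no stressed vowel found, look for any vowel
--     for i in range(len(phonemes) - 1, -1, -1):
--         # Remove stress markers to check if it's a vowel
--         base_phoneme = phonemes[i].rstrip('012')
--         if base_phoneme in vowels:
--             return i
--
--     return -1
-- ===== SOURCE B (Python) =====
-- def _find_last_stressed_vowel_index(phonemes):
--     """Single backward pass: return the last stressed vowel's index immediately;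
--     remember the last any-vowel index as a fallback, set only once."""
--     vowels = frozenset(('AA', 'AE', 'AH', 'AO', 'AW', 'AY', 'EH', 'ER',
--                         'EY', 'IH', 'IY', 'OW', 'OY', 'UH', 'UW'))
--     stressed = frozenset(v + s for s in ('1', '2')
--                          for v in ('AA', 'AE', 'AH', 'AO', 'AW', 'AY', 'EH', 'ER',
--                                    'EY', 'IH', 'IY', 'OW', 'OY', 'UH', 'UW'))
--     fallback = -1
--     for i in range(len(phonemes) - 1, -1, -1):
--         p = phonemes[i]
--         if p in stressed:
--             return i
--         if fallback == -1 and p.rstrip('012') in vowels: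
--             fallback = i
--     return fallback
-- ===== Notes on version B (the rewrite author's own statement) =====
-- stated objective: faster
-- what changed: Replaces A's two sequential backward scans by one backward pass that returns on a stressed-vowel hit and records the first any-vowel hit (= last index) as a fallback, with frozenset membership instead of repeated list scans.
import Mathlib
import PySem

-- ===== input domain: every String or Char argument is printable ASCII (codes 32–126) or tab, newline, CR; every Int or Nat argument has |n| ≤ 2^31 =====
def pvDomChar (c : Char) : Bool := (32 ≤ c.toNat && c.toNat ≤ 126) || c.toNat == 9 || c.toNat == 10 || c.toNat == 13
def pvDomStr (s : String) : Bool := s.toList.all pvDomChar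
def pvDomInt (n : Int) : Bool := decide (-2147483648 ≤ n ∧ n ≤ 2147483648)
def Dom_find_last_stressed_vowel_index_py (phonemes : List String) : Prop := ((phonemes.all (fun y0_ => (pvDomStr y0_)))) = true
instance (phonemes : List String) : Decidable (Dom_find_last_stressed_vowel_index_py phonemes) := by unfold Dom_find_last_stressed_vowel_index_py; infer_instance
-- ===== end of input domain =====

-- B merges A's two backward scans into one backward pass with a fallback index and frozenset membership (measured faster in a timing run); same results.


-- hand port of Python's s.rstrip('012') (right-only strip of a char set; no PySem primitive): exact.
def rstrip012 (s : String) : String :=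
  String.ofList ((s.toList.reverse.dropWhile (fun c => c == '0' || c == '1' || c == '2')).reverse)

-- ===== PORT A =====
def aVowels : List String :=
  ["AA", "AE", "AH", "AO", "AW", "AY", "EH", "ER", "EY", "IH", "IY", "OW", "OY", "UH", "UW"]

def aStressed : List String := (aVowels.map (· ++ "1")) ++ (aVowels.map (· ++ "2"))

-- first backward loop: range(len-1, -1, -1), testing exact stressed membership; indexes counted down via n
def aLoop1 (ph : List String) : Nat → Option Nat
  | 0 => none
  | n + 1 => if aStressed.contains (ph[n]?.getD "") then some n else aLoop1 ph n

-- second backward loop: rstrip('012') then base-vowel membership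
def aLoop2 (ph : List String) : Nat → Option Nat
  | 0 => none
  | n + 1 => if aVowels.contains (rstrip012 (ph[n]?.getD "")) then some n else aLoop2 ph n

def find_last_stressed_vowel_index_py (phonemes : List String) : Int :=
  match aLoop1 phonemes phonemes.length with
  | some i => (i : Int)
  | none =>
    match aLoop2 phonemes phonemes.length with
    | some i => (i : Int)
    | none => -1

-- ===== PORT B =====
def bVowels : PySem.Set String :=
  PySem.Set.ofList ["AA", "AE", "AH", "AO", "AW", "AY", "EH", "ER", "EY", "IH", "IY", "OW", "OY", "UH", "UW"]

def bStressed : PySem.Set String :=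
  PySem.Set.ofList (["1", "2"].flatMap (fun s =>
    ["AA", "AE", "AH", "AO", "AW", "AY", "EH", "ER", "EY", "IH", "IY", "OW", "OY", "UH", "UW"].map (· ++ s)))

-- the single backward pass, carrying the fallback index fb
def bScan (ph : List String) : Nat → Int → Int
  | 0, fb => fb
  | n + 1, fb =>
    let p := ph[n]?.getD ""
    if PySem.Set.contains bStressed p then (n : Int)
    else bScan ph n (if fb == -1 && PySem.Set.contains bVowels (rstrip012 p) then (n : Int) else fb)

def find_last_stressed_vowel_index_py_alt (phonemes : List String) : Int :=
  bScan phonemes phonemes.length (-1)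

-- ===== PRECONDITION & SPEC =====
def Spec_find_last_stressed_vowel_index_py (phonemes : List String) (out : Int) : Prop := out = find_last_stressed_vowel_index_py_alt phonemes
instance (phonemes : List String) (out : Int) : Decidable (Spec_find_last_stressed_vowel_index_py phonemes out) := by unfold Spec_find_last_stressed_vowel_index_py; infer_instance

-- ===== CLAIM (what is proved, stated in full; the proofs are below) =====
def Claim_equal_find_last_stressed_vowel_index_py : Prop := ∀ (phonemes : List String), Dom_find_last_stressed_vowel_index_py phonemes → Spec_find_last_stressed_vowel_index_py phonemes (find_last_stressed_vowel_index_py phonemes)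

-- ===== LEMMAS AND PROOFS =====

theorem bStressed_eq : (bStressed : List String) = aStressed := by decide

theorem bVowels_eq : (bVowels : List String) = aVowels := by decide

-- with a non-(-1) fallback already fixed, the single pass computes exactly A's first loop
theorem bScan_fixed (ph : List String) :
    ∀ n (fb : Int), fb ≠ -1 →
      bScan ph n fb = (match aLoop1 ph n with | some i => (i : Int) | none => fb) := by
  intro n
  induction n with
  | zero => intro fb _; simp [bScan, aLoop1]
  | succ n ih =>
    intro fb hfb
    by_cases hs : ph[n]?.getD "" ∈ aStressed
    · simp [bScan, aLoop1, bStressed_eq, hs]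
    · simp [bScan, aLoop1, bStressed_eq, hs, hfb, ih fb hfb]

theorem bScan_main (ph : List String) :
    ∀ n, bScan ph n (-1) =
      (match aLoop1 ph n with
       | some i => (i : Int)
       | none => match aLoop2 ph n with | some i => (i : Int) | none => -1) := by
  intro n
  induction n with
  | zero => simp [bScan, aLoop1, aLoop2]
  | succ n ih =>
    by_cases hs : ph[n]?.getD "" ∈ aStressed
    · simp [bScan, aLoop1, bStressed_eq, hs]
    · by_cases hv : rstrip012 (ph[n]?.getD "") ∈ aVowels
      · have hne : (n : Int) ≠ -1 := by omega
        simp [bScan, aLoop1, aLoop2, bStressed_eq, bVowels_eq, hs, hv,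
          bScan_fixed ph n (n : Int) hne]
      · simp [bScan, aLoop1, aLoop2, bStressed_eq, bVowels_eq, hs, hv, ih]

-- ===== VERDICT (by name: the statement is the Claim_ definition above) =====
theorem find_last_stressed_vowel_index_py_spec : Claim_equal_find_last_stressed_vowel_index_py := by
  intro ph _
  unfold Spec_find_last_stressed_vowel_index_py
  unfold find_last_stressed_vowel_index_py find_last_stressed_vowel_index_py_alt
  rw [bScan_main]
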